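-- pv_equiv track=rewrite | github.com/ENCODE-DCC/encoded | src/encoded/genomic_data_service.py | get_filtered_and_sorted_facets
-- ===== SOURCE A (Python) =====
-- RNA_GET_FACETS = [
--     'assayType',
--     'biosample_classification',
--     'biosample_term_name',
--     'biosample_organ',
--     'biosample_system',
--     'biosample_sex',
--     'annotation',
-- ]
--
-- def get_filtered_and_sorted_facets(facets):
--     return sorted(
--         (
--             facet
--             for facet in facets
--             if facet in RNA_GET_FACETS
--         ),
--         key=lambda facet: RNA_GET_FACETS.index(facet)
--     )
-- ===== SOURCE B (Python) =====
-- RNA_GET_FACETS = [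
--     'assayType',
--     'biosample_classification',
--     'biosample_term_name',
--     'biosample_organ',
--     'biosample_system',
--     'biosample_sex',
--     'annotation',
-- ]
--
-- def get_filtered_and_sorted_facets(facets):
--     facets_list = list(facets)
--     out = []
--     for key in RNA_GET_FACETS:
--         out.extend(f for f in facets_list if f == key)
--     return out
-- ===== Notes on version B (the rewrite author's own statement) =====
-- stated objective: simpler
-- what changed: Replaces the comparison sort keyed on RNA_GET_FACETS.index with a single bucket pass driven by the fixed order list: for each allowed facet in order, append all equal occurrences; no sorted() and no index() lookups.
import Mathlib
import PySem

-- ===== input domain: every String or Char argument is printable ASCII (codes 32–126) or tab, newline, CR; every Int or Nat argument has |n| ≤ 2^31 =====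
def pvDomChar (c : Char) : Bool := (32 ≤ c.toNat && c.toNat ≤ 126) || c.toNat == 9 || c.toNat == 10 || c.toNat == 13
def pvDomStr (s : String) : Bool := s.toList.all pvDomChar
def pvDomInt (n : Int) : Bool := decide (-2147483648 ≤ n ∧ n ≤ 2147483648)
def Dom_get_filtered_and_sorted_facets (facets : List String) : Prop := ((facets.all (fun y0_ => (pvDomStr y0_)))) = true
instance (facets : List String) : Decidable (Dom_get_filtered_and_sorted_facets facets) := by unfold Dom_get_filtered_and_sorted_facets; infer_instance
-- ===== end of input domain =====

-- B replaces the comparison sort keyed by RNA_GET_FACETS.index with a single bucket pass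
-- driven by the fixed order list (simpler; equal return value is proved below).

-- the module constant RNA_GET_FACETS
def pvRNA : List String :=
  ["assayType", "biosample_classification", "biosample_term_name",
   "biosample_organ", "biosample_system", "biosample_sex", "annotation"]

-- ===== PORT A =====
-- sorted((facet for facet in facets if facet in RNA_GET_FACETS), key=lambda facet: RNA_GET_FACETS.index(facet))
-- .index is PySem.List.index?; the filter guarantees membership, so the ValueError branch
-- (none) is unreachable and getD 0 is exact there.
def get_filtered_and_sorted_facets (facets : List String) : List String :=
  PySem.List.sorted (facets.filter (fun facet => decide (facet ∈ pvRNA)))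
    (fun facet => ((PySem.List.index? pvRNA facet).getD 0 : Nat)) false

-- ===== PORT B =====
-- out = []; for key in RNA_GET_FACETS: out.extend(f for f in facets_list if f == key); return out
def get_filtered_and_sorted_facets_alt (facets : List String) : List String :=
  pvRNA.foldl (fun out key => out ++ facets.filter (fun f => f == key)) []

-- ===== PRECONDITION & SPEC =====
def Spec_get_filtered_and_sorted_facets (facets : List String) (out : List String) : Prop := out = get_filtered_and_sorted_facets_alt facets
instance (facets : List String) (out : List String) : Decidable (Spec_get_filtered_and_sorted_facets facets out) := by unfold Spec_get_filtered_and_sorted_facets; infer_instance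

-- ===== CLAIM (what is proved, stated in full; the proofs are below) =====
def Claim_equal_get_filtered_and_sorted_facets : Prop := ∀ (facets : List String), Dom_get_filtered_and_sorted_facets facets → Spec_get_filtered_and_sorted_facets facets (get_filtered_and_sorted_facets facets)

-- ===== LEMMAS AND PROOFS =====

-- A's sort key: position in pvRNA
def pvKey (f : String) : Nat := (PySem.List.index? pvRNA f).getD 0

-- the key is injective on members of pvRNA
theorem pvKey_inj : ∀ a ∈ pvRNA, ∀ b ∈ pvRNA, pvKey a = pvKey b → a = b := by decide

-- B as a flatMap of buckets
theorem alt_eq_flatMap (facets : List String) :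
    get_filtered_and_sorted_facets_alt facets
      = pvRNA.flatMap (fun key => facets.filter (fun f => f == key)) := by
  unfold get_filtered_and_sorted_facets_alt
  rw [PySem.List.foldl_append_eq_flatMap]
  exact List.nil_append _

-- the bucket concatenation is a permutation of the filtered input
theorem alt_perm_filter (facets : List String) :
    (pvRNA.flatMap (fun key => facets.filter (fun f => f == key))).Perm
      (facets.filter (fun facet => decide (facet ∈ pvRNA))) := by
  rw [List.perm_iff_count]
  intro a
  rw [List.count_flatMap]
  have hbucket : ∀ k : String, List.count a (facets.filter (fun f => f == k))
      = if a = k then facets.count a else 0 := by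
    intro k
    by_cases hk : a = k
    · subst hk
      rw [if_pos rfl, List.count_filter (by simp)]
    · rw [if_neg hk, List.count_eq_zero]
      intro hmem
      have := List.of_mem_filter hmem
      simp at this
      exact hk this
  have hmap : (List.map (List.count a ∘ fun key => facets.filter (fun f => f == key)) pvRNA)
      = List.map (fun key => if a = key then facets.count a else 0) pvRNA :=
    List.map_congr_left (fun k _ => hbucket k)
  rw [hmap]
  by_cases ha : a ∈ pvRNA
  · rw [List.count_filter (by simpa using ha)]
    -- pvRNA has no duplicates, so the sum picks count a facets exactly once
    fin_cases ha <;> simp [pvRNA]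
  · rw [List.sum_eq_zero, Eq.comm, List.count_eq_zero]
    · intro hmem
      have := List.of_mem_filter hmem
      simp at this
      exact ha this
    · intro x hx
      simp only [List.mem_map] at hx
      obtain ⟨k, hk, rfl⟩ := hx
      refine if_neg (fun h : a = k => ha ?_)
      exact h ▸ hk

-- the bucket concatenation is pairwise nondecreasing in the key
theorem alt_pairwise (facets : List String) :
    (pvRNA.flatMap (fun key => facets.filter (fun f => f == key))).Pairwise
      (fun a b => pvKey a ≤ pvKey b) := by
  rw [List.pairwise_flatMap]
  constructor
  · intro k _
    rw [List.pairwise_iff_forall_sublist]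
    intro a b hsub
    have ha : a ∈ facets.filter (fun f => f == k) := hsub.mem (by simp)
    have hb : b ∈ facets.filter (fun f => f == k) := hsub.mem (by simp)
    have ha' := List.of_mem_filter ha
    have hb' := List.of_mem_filter hb
    simp at ha' hb'
    rw [ha', hb']
  · have hR : pvRNA.Pairwise (fun k k' => pvKey k ≤ pvKey k') := by decide
    refine hR.imp_of_mem ?_
    intro k k' hk hk' hle x hx y hy
    have hx' := List.of_mem_filter hx
    have hy' := List.of_mem_filter hy
    simp at hx' hy'
    rw [hx', hy']
    exact hle

-- everything in A's output is a member of pvRNA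
theorem mem_A_mem_R (facets : List String) :
    ∀ a ∈ get_filtered_and_sorted_facets facets, a ∈ pvRNA := by
  intro a ha
  unfold get_filtered_and_sorted_facets at ha
  rw [PySem.List.mem_sorted] at ha
  have := List.of_mem_filter ha
  simpa using this

-- ===== VERDICT (by name: the statement is the Claim_ definition above) =====
theorem get_filtered_and_sorted_facets_spec : Claim_equal_get_filtered_and_sorted_facets := by
  intro facets _
  unfold Spec_get_filtered_and_sorted_facets
  rw [alt_eq_flatMap]
  set L := pvRNA.flatMap (fun key => facets.filter (fun f => f == key)) with hL
  refine List.Perm.eq_of_pairwise (le := fun a b => pvKey a ≤ pvKey b) ?_ ?_ ?_ ?_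
  · intro a b ha hb h1 h2
    have haR := mem_A_mem_R facets a ha
    have hbR : b ∈ pvRNA := by
      have hb' : b ∈ L := hb
      rw [hL, List.mem_flatMap] at hb'
      obtain ⟨k, hk, hmem⟩ := hb'
      have := List.of_mem_filter hmem
      simp at this
      exact this ▸ hk
    exact pvKey_inj a haR b hbR (Nat.le_antisymm h1 h2)
  · have := PySem.List.sorted_pairwise (facets.filter (fun facet => decide (facet ∈ pvRNA)))
      (fun facet => ((PySem.List.index? pvRNA facet).getD 0 : Nat))
    exact this
  · exact alt_pairwise facets
  · exact ((alt_perm_filter facets).trans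
      (PySem.List.sorted_perm _ _ _).symm).symm
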